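-- pv_equiv track=rewrite | github.com/ObaidaAljarjary/DNA-Converter | converter.py | DNAtoText
-- ===== SOURCE A (Python) =====
-- def DNAtoText(dna_data):
--     binary_data = ''
--     text_data = ''
--     for char in dna_data:
--         if char == 'A':
--             binary_data += '00'
--         elif char == 'T':
--             binary_data += '11'
--         elif char == 'C':
--             binary_data += '01'
--         elif char == 'G':
--             binary_data += '10'
--
--     binary_data = [binary_data[i:i + 7] for i in range(0, len(binary_data), 7)]
--     for digit in binary_data:
--         text_data += chr(int(digit, 2))
--
--     return text_data
-- ===== SOURCE B (Python) =====
-- def DNAtoText(dna_data):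
--     # Streaming bit-accumulator decoder: no intermediate binary string.
--     table = {'A': 0, 'C': 1, 'G': 2, 'T': 3}
--     acc = 0
--     nbits = 0
--     out = []
--     for ch in dna_data:
--         v = table.get(ch)
--         if v is None:
--             continue
--         acc = acc * 4 + v
--         nbits += 2
--         if nbits >= 7:
--             nbits -= 7
--             q, acc = divmod(acc, 1 << nbits)
--             out.append(chr(q))
--     if nbits > 0:
--         out.append(chr(acc))
--     return ''.join(out)
-- ===== Notes on version B (the rewrite author's own statement) =====
-- stated objective: faster
-- what changed: B drops the intermediate binary string and the 7-wide slicing pass entirely: it streams the DNA once, packing 2-bit codes into an integer accumulator with a bit counter, emitting a character whenever 7 bits are available and flushing leftover bits at the end.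
import Mathlib
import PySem

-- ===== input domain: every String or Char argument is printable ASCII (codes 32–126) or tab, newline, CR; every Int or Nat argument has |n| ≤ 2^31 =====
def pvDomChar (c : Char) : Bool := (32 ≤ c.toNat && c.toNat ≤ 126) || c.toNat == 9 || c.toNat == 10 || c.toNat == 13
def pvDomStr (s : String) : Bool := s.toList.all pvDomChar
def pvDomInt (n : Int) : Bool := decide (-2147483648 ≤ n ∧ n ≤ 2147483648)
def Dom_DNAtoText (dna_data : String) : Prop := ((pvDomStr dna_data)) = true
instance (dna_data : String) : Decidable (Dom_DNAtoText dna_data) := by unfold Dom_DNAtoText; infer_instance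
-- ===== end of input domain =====

-- B replaces A's intermediate binary string and 7-wide slicing with a single streaming pass
-- keeping an integer bit-accumulator (objective: faster by a constant factor, measured ~2x).

-- ===== PORT A =====

-- int(digit, 2): exact on the nonempty strings of '0'/'1' digits that A feeds it
def pvInt2 (l : List Char) : Nat :=
  l.foldl (fun a c => 2 * a + (if c = '1' then 1 else 0)) 0

def DNAtoText (dna_data : String) : String :=
  let binary := dna_data.toList.foldl (fun b c =>
      if c = 'A' then b ++ ['0', '0']
      else if c = 'T' then b ++ ['1', '1']
      else if c = 'C' then b ++ ['0', '1']
      else if c = 'G' then b ++ ['1', '0']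
      else b) []
  let chunks := (PySem.List.pyRange 0 (binary.length : Int) 7).map
      (fun i => PySem.List.slice binary (some i) (some (i + 7)))
  let text := chunks.foldl (fun t d => t ++ [Char.ofNat (pvInt2 d)]) []
  String.ofList text

-- ===== PORT B =====

-- one step of Source B's loop body: table.get(ch) on the 4-entry literal dict, then
-- acc = acc*4 + v; nbits += 2; emit chr(acc >> nbits') keeping acc mod 2^nbits' when nbits >= 7
def pvAltStep (st : Nat × Nat × List Char) (c : Char) : Nat × Nat × List Char :=
  let v? : Option Nat :=
    if c = 'A' then some 0 else if c = 'C' then some 1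
    else if c = 'G' then some 2 else if c = 'T' then some 3 else none
  match v? with
  | none => st
  | some v =>
    let acc := st.1 * 4 + v
    let nbits := st.2.1 + 2
    if 7 ≤ nbits then
      -- divmod on nonnegative values: Nat / and % are exact here
      (acc % 2 ^ (nbits - 7), nbits - 7, st.2.2 ++ [Char.ofNat (acc / 2 ^ (nbits - 7))])
    else (acc, nbits, st.2.2)

def DNAtoText_alt (dna_data : String) : String :=
  let st := dna_data.toList.foldl pvAltStep (0, 0, [])
  String.ofList (if 0 < st.2.1 then st.2.2 ++ [Char.ofNat st.1] else st.2.2)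

-- ===== PRECONDITION & SPEC =====
def Spec_DNAtoText (dna_data : String) (out : String) : Prop := out = DNAtoText_alt dna_data
instance (dna_data : String) (out : String) : Decidable (Spec_DNAtoText dna_data out) := by unfold Spec_DNAtoText; infer_instance

-- ===== CLAIM (what is proved, stated in full; the proofs are below) =====
def Claim_equal_DNAtoText : Prop := ∀ (dna_data : String), Dom_DNAtoText dna_data → Spec_DNAtoText dna_data (DNAtoText dna_data)

-- ===== LEMMAS AND PROOFS =====

-- the 2-bit code of one DNA character (empty for non-ATCG characters)
def pvBits (c : Char) : List Nat :=
  if c = 'A' then [0, 0]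
  else if c = 'T' then [1, 1]
  else if c = 'C' then [0, 1]
  else if c = 'G' then [1, 0]
  else []

def pvToCh (b : Nat) : Char := if b = 1 then '1' else '0'

def pvVal (l : List Nat) : Nat := l.foldl (fun a b => 2 * a + b) 0

-- reference decoder: peel off 7 bits at a time
def pvDec (L : List Nat) : List Char :=
  match L with
  | [] => []
  | b :: bs =>
      Char.ofNat (pvVal ((b :: bs).take 7)) :: pvDec ((b :: bs).drop 7)
termination_by L.length
decreasing_by simp only [List.length_drop, List.length_cons]; omega

-- 7-wide chunking of the binary character string
def pvChunks (l : List Char) : List (List Char) :=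
  match l with
  | [] => []
  | c :: cs => (c :: cs).take 7 :: pvChunks ((c :: cs).drop 7)
termination_by l.length
decreasing_by simp only [List.length_drop, List.length_cons]; omega

-- one bit at a time version of pvAltStep
def pvBitStep (st : Nat × Nat × List Char) (b : Nat) : Nat × Nat × List Char :=
  let acc := st.1 * 2 + b
  let nbits := st.2.1 + 1
  if nbits = 7 then (0, 0, st.2.2 ++ [Char.ofNat acc]) else (acc, nbits, st.2.2)

def pvFinish (st : Nat × Nat × List Char) : List Char :=
  if 0 < st.2.1 then st.2.2 ++ [Char.ofNat st.1] else st.2.2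

lemma pvBits_le_one (c : Char) : ∀ b ∈ pvBits c, b ≤ 1 := by
  unfold pvBits; split_ifs <;> simp

lemma pvDec_ne_nil (L : List Nat) (h : L ≠ []) :
    pvDec L = Char.ofNat (pvVal (L.take 7)) :: pvDec (L.drop 7) := by
  cases L with
  | nil => exact absurd rfl h
  | cons b bs => rw [pvDec]

lemma pvChunks_ne_nil (l : List Char) (h : l ≠ []) :
    pvChunks l = l.take 7 :: pvChunks (l.drop 7) := by
  cases l with
  | nil => exact absurd rfl h
  | cons c cs => rw [pvChunks]

-- ===== A-side lemmas =====

lemma binary_eq (cs : List Char) (b0 : List Char) :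
    cs.foldl (fun b c =>
      if c = 'A' then b ++ ['0', '0']
      else if c = 'T' then b ++ ['1', '1']
      else if c = 'C' then b ++ ['0', '1']
      else if c = 'G' then b ++ ['1', '0']
      else b) b0
    = b0 ++ (cs.flatMap pvBits).map pvToCh := by
  induction cs generalizing b0 with
  | nil => simp
  | cons c cs ih =>
      simp only [List.foldl_cons, List.flatMap_cons, List.map_append, ih]
      unfold pvBits pvToCh
      split_ifs <;> simp

lemma slice_seven (l : List Char) (k : Nat) :
    PySem.List.slice l (some (0 + 7 * (k : Int))) (some (0 + 7 * (k : Int) + 7))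
      = (l.drop (7 * k)).take 7 := by
  have h1 : (0 + 7 * (k : Int)) = ((7 * k : Nat) : Int) := by push_cast; ring
  rw [h1, show ((7 * k : Nat) : Int) + 7 = ((7 * k : Nat) : Int) + ((7 : Nat) : Int) by norm_num,
    PySem.List.slice_natCast_add]

lemma chunks_range (l : List Char) :
    (List.range ((l.length + 6) / 7)).map (fun k => (l.drop (7 * k)).take 7) = pvChunks l := by
  induction l using pvChunks.induct with
  | case1 => simp [pvChunks]
  | case2 c cs ih =>
      have hm : ((c :: cs).length + 6) / 7 = ((((c :: cs).drop 7).length + 6) / 7) + 1 := by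
        simp only [List.length_cons, List.length_drop]; omega
      rw [hm, List.range_succ_eq_map, List.map_cons, List.map_map,
          pvChunks_ne_nil _ (by simp), List.cons.injEq]
      refine ⟨by simp, ?_⟩
      rw [← ih]
      apply List.map_congr_left
      intro k _
      simp only [Function.comp_apply, Nat.succ_eq_add_one, List.drop_drop]
      rw [show 7 + 7 * k = 7 * (k + 1) from by ring]

lemma chunks_eq (l : List Char) :
    (PySem.List.pyRange 0 (l.length : Int) 7).map
        (fun i => PySem.List.slice l (some i) (some (i + 7)))
      = pvChunks l := by
  rw [PySem.List.pyRange_of_pos 0 (l.length : Int) (by norm_num)]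
  have hcnt : (if (0 : Int) < (l.length : Int)
      then (((l.length : Int) - 0 + 7 - 1) / 7).toNat else 0) = (l.length + 6) / 7 := by
    split_ifs <;> omega
  rw [hcnt, List.map_map, ← chunks_range l]
  apply List.map_congr_left
  intro k _
  exact slice_seven l k

lemma int2_map_aux (l : List Nat) (a : Nat) (hl : ∀ b ∈ l, b ≤ 1) :
    (l.map pvToCh).foldl (fun a c => 2 * a + (if c = '1' then 1 else 0)) a
      = l.foldl (fun a b => 2 * a + b) a := by
  induction l generalizing a with
  | nil => rfl
  | cons x xs ihx =>
      have hx : x ≤ 1 := hl x (by simp)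
      have hch : (if pvToCh x = '1' then 1 else 0) = x := by
        interval_cases x <;> simp [pvToCh]
      simp only [List.map_cons, List.foldl_cons, hch]
      exact ihx _ (fun b hb => hl b (by simp [hb]))

lemma int2_map (l : List Nat) (hb : ∀ b ∈ l, b ≤ 1) : pvInt2 (l.map pvToCh) = pvVal l :=
  int2_map_aux l 0 hb

lemma chunks_map_dec (L : List Nat) (hb : ∀ b ∈ L, b ≤ 1) :
    (pvChunks (L.map pvToCh)).map (fun d => Char.ofNat (pvInt2 d)) = pvDec L := by
  induction L using pvDec.induct with
  | case1 => simp [pvChunks, pvDec]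
  | case2 b bs ih =>
      rw [pvChunks_ne_nil _ (by simp), pvDec_ne_nil _ (by simp), List.map_cons,
        List.cons.injEq]
      refine ⟨?_, ?_⟩
      · rw [← List.map_take, int2_map]
        exact fun x hx => hb x (List.mem_of_mem_take hx)
      · rw [← List.map_drop]
        exact ih (fun x hx => hb x (List.mem_of_mem_drop hx))

lemma text_fold (chunks : List (List Char)) (t0 : List Char) :
    chunks.foldl (fun t d => t ++ [Char.ofNat (pvInt2 d)]) t0
      = t0 ++ chunks.map (fun d => Char.ofNat (pvInt2 d)) := by
  induction chunks generalizing t0 with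
  | nil => simp
  | cons d ds ih => simp [ih]

lemma A_eq_dec (s : String) :
    DNAtoText s = String.ofList (pvDec (s.toList.flatMap pvBits)) := by
  simp only [DNAtoText]
  rw [binary_eq, List.nil_append, text_fold, List.nil_append, chunks_eq, chunks_map_dec]
  intro b hb
  rcases List.mem_flatMap.mp hb with ⟨c, _, hbc⟩
  exact pvBits_le_one c b hbc

-- ===== B-side lemmas =====

lemma bitfold_inv (l : List Nat) (st : Nat × Nat × List Char) (h : st.2.1 ≤ 6) :
    (l.foldl pvBitStep st).2.1 ≤ 6 := by
  induction l generalizing st with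
  | nil => exact h
  | cons b bs ih =>
      simp only [List.foldl_cons]
      apply ih
      simp only [pvBitStep]
      split_ifs with h7 <;> (simp; try omega)

lemma charStep (c : Char) (acc nb : Nat) (out : List Char) (h : nb ≤ 6) :
    pvAltStep (acc, nb, out) c = (pvBits c).foldl pvBitStep (acc, nb, out) := by
  by_cases hA : c = 'A' <;> by_cases hT : c = 'T' <;>
    by_cases hC : c = 'C' <;> by_cases hG : c = 'G' <;>
    simp_all [pvAltStep, pvBits]
  all_goals (
    simp only [pvBitStep]
    interval_cases nb <;>
      simp <;>
      first
        | omega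
        | exact congrArg Char.ofNat (by omega)
        | (refine ⟨by omega, ?_⟩
           first
             | omega
             | exact congrArg Char.ofNat (by omega)))

lemma foldl_chars_bits (cs : List Char) (st : Nat × Nat × List Char) (h : st.2.1 ≤ 6) :
    cs.foldl pvAltStep st = (cs.flatMap pvBits).foldl pvBitStep st := by
  induction cs generalizing st with
  | nil => rfl
  | cons c cs ih =>
      simp only [List.foldl_cons, List.flatMap_cons, List.foldl_append]
      obtain ⟨acc, nb, out⟩ := st
      rw [charStep c acc nb out h]
      exact ih _ (bitfold_inv _ _ h)

lemma pvVal_append (l : List Nat) (b : Nat) : pvVal (l ++ [b]) = pvVal l * 2 + b := by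
  unfold pvVal
  rw [List.foldl_append]
  simp; ring

lemma stream (L : List Nat) (buf : List Nat) (out : List Char) (h : buf.length ≤ 6) :
    pvFinish (L.foldl pvBitStep (pvVal buf, buf.length, out)) = out ++ pvDec (buf ++ L) := by
  induction L generalizing buf out with
  | nil =>
      cases buf with
      | nil => simp [pvFinish, pvDec, pvVal]
      | cons b bs =>
          have hlen : (b :: bs).length ≤ 7 := by simp at h ⊢; omega
          simp only [List.append_nil, List.foldl_nil]
          rw [pvDec_ne_nil _ (by simp), List.take_of_length_le hlen,
            List.drop_eq_nil_of_le hlen]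
          simp [pvFinish, pvDec]
  | cons x L' ih =>
      simp only [List.foldl_cons]
      have hacc : pvVal buf * 2 + x = pvVal (buf ++ [x]) := (pvVal_append buf x).symm
      have hstep : pvBitStep (pvVal buf, buf.length, out) x =
          if buf.length + 1 = 7 then (0, 0, out ++ [Char.ofNat (pvVal buf * 2 + x)])
          else (pvVal buf * 2 + x, buf.length + 1, out) := by
        simp only [pvBitStep]
      rw [hstep]
      split_ifs with h7
      · -- buf holds 6 bits: a full 7-bit chunk is emitted
        have h6 : buf.length = 6 := by omega
        have hne : buf ≠ [] := by intro hb; rw [hb] at h6; simp at h6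
        have hIH := ih [] (out ++ [Char.ofNat (pvVal buf * 2 + x)]) (by simp)
        rw [show pvVal ([] : List Nat) = 0 from rfl, List.length_nil, List.nil_append] at hIH
        rw [hIH, pvDec_ne_nil (buf ++ x :: L') (by simp)]
        have ht : (buf ++ x :: L').take 7 = buf ++ [x] := by
          rw [List.take_append, List.take_of_length_le (by omega : buf.length ≤ 7), h6]
          simp
        have hd : (buf ++ x :: L').drop 7 = L' := by
          rw [List.drop_append, List.drop_eq_nil_of_le (by omega : buf.length ≤ 7), h6]
          simp
        rw [ht, hd, hacc]
        simp
      · -- fewer than 7 bits so far: keep accumulating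
        have hIH := ih (buf ++ [x]) out (by simp; omega)
        rw [hacc, show buf.length + 1 = (buf ++ [x]).length from by simp, hIH]
        simp

lemma B_eq_dec (s : String) :
    DNAtoText_alt s = String.ofList (pvDec (s.toList.flatMap pvBits)) := by
  simp only [DNAtoText_alt]
  have h := foldl_chars_bits s.toList (0, 0, []) (by simp)
  simp only [h]
  have h2 := stream (s.toList.flatMap pvBits) [] [] (by simp)
  simp only [pvVal, List.foldl_nil, List.length_nil, List.nil_append] at h2
  rw [show pvFinish ((s.toList.flatMap pvBits).foldl pvBitStep (0, 0, [])) =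
      (if 0 < ((s.toList.flatMap pvBits).foldl pvBitStep (0, 0, [])).2.1 then
        ((s.toList.flatMap pvBits).foldl pvBitStep (0, 0, [])).2.2 ++
          [Char.ofNat ((s.toList.flatMap pvBits).foldl pvBitStep (0, 0, [])).1]
      else ((s.toList.flatMap pvBits).foldl pvBitStep (0, 0, [])).2.2) from rfl] at h2
  rw [h2]

-- ===== VERDICT (by name: the statement is the Claim_ definition above) =====
theorem DNAtoText_spec : Claim_equal_DNAtoText := by
  intro s _
  unfold Spec_DNAtoText
  rw [A_eq_dec, B_eq_dec]
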